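-- pv_equiv track=rewrite | github.com/OhJeMIN/algorithm | Programmers/Lv2/n^2 배열 자르기/Ohjemin1.py | solution
-- ===== SOURCE A (Python) =====
-- def solution(n, left, right):
--     answer = []
--     my_list = [[0 for i in range(n)]for j in range(n)]
--     for y in range(n):
--         my_list[y][y] = y+1
--         for i in range(y):
--             my_list[y][i] = my_list[y][y]
--             my_list[i][y] = my_list[y][y]
--     idx = 0
--     for y in range(n):
--         for x in range(n):
--             if left <= idx <=right:
--                 num = x if x > y else y
--                 answer.append(my_list[y][x])
--             idx +=1
--     return answer
-- ===== SOURCE B (Python) =====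
-- def solution(n, left, right):
--     # value at flat index i of the n×n grid is max(row, col) + 1; emit slice directly
--     if n <= 0:
--         return []
--     lo = max(left, 0)
--     hi = min(right, n * n - 1)
--     return [max(divmod(i, n)) + 1 for i in range(lo, hi + 1)]
-- ===== Notes on version B (the rewrite author's own statement) =====
-- stated objective: faster
-- what changed: B never builds the n×n matrix or scans all n² cells: it computes each requested entry directly as max(i//n, i%n)+1 over only the clamped index range [max(left,0), min(right, n²-1)].
import Mathlib
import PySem

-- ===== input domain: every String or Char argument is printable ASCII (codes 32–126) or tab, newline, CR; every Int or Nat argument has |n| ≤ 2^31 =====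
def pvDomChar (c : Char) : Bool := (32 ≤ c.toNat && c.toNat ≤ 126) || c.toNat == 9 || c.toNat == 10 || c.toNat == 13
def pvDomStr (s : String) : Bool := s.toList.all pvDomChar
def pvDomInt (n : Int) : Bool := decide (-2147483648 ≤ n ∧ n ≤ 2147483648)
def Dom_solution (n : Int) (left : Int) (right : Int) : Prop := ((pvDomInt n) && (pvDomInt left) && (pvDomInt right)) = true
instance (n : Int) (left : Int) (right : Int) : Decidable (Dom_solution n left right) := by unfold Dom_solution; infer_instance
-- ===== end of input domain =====

-- B skips A's n×n matrix construction and full-grid scan: it computes each requested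
-- entry directly as max(i//n, i%n)+1 over the clamped index range only.

-- ===== PORT A =====
-- my_list[y][x]  (A only ever reads/writes in-range cells)
def pvGet2 (m : List (List Int)) (y x : Int) : Int :=
  PySem.List.pyGetD (PySem.List.pyGetD m y []) x 0

-- my_list[y][x] = v
def pvSet2 (m : List (List Int)) (y x : Int) (v : Int) : List (List Int) :=
  PySem.List.pySetD m y (PySem.List.pySetD (PySem.List.pyGetD m y []) x v)

def solution (n : Int) (left : Int) (right : Int) : List Int :=
  let my0 : List (List Int) :=
    (PySem.List.pyRange 0 n 1).map (fun _j => (PySem.List.pyRange 0 n 1).map (fun _i => (0 : Int)))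
  let m : List (List Int) :=
    (PySem.List.pyRange 0 n 1).foldl (fun m y =>
      let m := pvSet2 m y y (y + 1)
      (PySem.List.pyRange 0 y 1).foldl (fun m i =>
        let m := pvSet2 m y i (pvGet2 m y y)
        pvSet2 m i y (pvGet2 m y y)) m) my0
  let st : List Int × Int :=
    (PySem.List.pyRange 0 n 1).foldl (fun st y =>
      (PySem.List.pyRange 0 n 1).foldl (fun (st : List Int × Int) x =>
        let (answer, idx) := st
        if left ≤ idx ∧ idx ≤ right then
          let _num := if x > y then x else y
          (answer ++ [pvGet2 m y x], idx + 1)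
        else (answer, idx + 1)) st) ([], 0)
  st.1

-- ===== PORT B =====
def solution_alt (n : Int) (left : Int) (right : Int) : List Int :=
  if n ≤ 0 then []
  else
    let lo := max left 0
    let hi := min right (n * n - 1)
    (PySem.List.pyRange lo (hi + 1) 1).map
      (fun i => max (PySem.Int.floordiv i n) (PySem.Int.mod i n) + 1)

-- ===== PRECONDITION & SPEC =====
def Spec_solution (n : Int) (left : Int) (right : Int) (out : List Int) : Prop := out = solution_alt n left right
instance (n : Int) (left : Int) (right : Int) (out : List Int) : Decidable (Spec_solution n left right out) := by unfold Spec_solution; infer_instance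

-- ===== CLAIM (what is proved, stated in full; the proofs are below) =====
def Claim_equal_solution : Prop := ∀ (n : Int) (left : Int) (right : Int), Dom_solution n left right → Spec_solution n left right (solution n left right)

-- ===== LEMMAS AND PROOFS =====
def pvMk (n : Int) (F : Int → Int → Int) : List (List Int) :=
  (PySem.List.pyRange 0 n 1).map (fun y => (PySem.List.pyRange 0 n 1).map (fun x => F y x))

theorem pvMk_congr (n : Int) (F G : Int → Int → Int)
    (h : ∀ y x, 0 ≤ y → y < n → 0 ≤ x → x < n → F y x = G y x) :
    pvMk n F = pvMk n G := by
  unfold pvMk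
  apply List.map_congr_left
  intro y hy
  rw [PySem.List.mem_pyRange_one] at hy
  apply List.map_congr_left
  intro x hx
  rw [PySem.List.mem_pyRange_one] at hx
  exact h y x hy.1 hy.2 hx.1 hx.2


theorem pvGet2_mk (n : Int) (F : Int → Int → Int) {y x : Int}
    (hy0 : 0 ≤ y) (hy : y < n) (hx0 : 0 ≤ x) (hx : x < n) :
    pvGet2 (pvMk n F) y x = F y x := by
  unfold pvGet2 pvMk
  rw [PySem.List.pyGetD_map_pyRange_of_nonneg _ _ _ _ hy0 hy,
      PySem.List.pyGetD_map_pyRange_of_nonneg _ _ _ _ hx0 hx]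

theorem pvSetMapRange {α : Type} (n : Int) (f : Int → α) (y : Int) (v : α)
    (hy0 : 0 ≤ y) (_hy : y < n) :
    ((PySem.List.pyRange 0 n 1).map f).set y.toNat v
      = (PySem.List.pyRange 0 n 1).map (fun t => if t = y then v else f t) := by
  apply List.ext_getElem
  · simp
  · intro k h1 h2
    simp only [List.getElem_set, List.getElem_map, PySem.List.getElem_pyRange_one]
    have hk : k < (n - 0).toNat := by simpa [PySem.List.length_pyRange_one] using h2
    by_cases hc : k = y.toNat
    · simp [hc, Int.toNat_of_nonneg hy0]
    · have hA : ¬ (y.toNat = k) := fun h => hc h.symm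
      have hB : ¬ ((k : Int) = y) := by omega
      simp [hA, hB]


theorem pvSet2_mk (n : Int) (F : Int → Int → Int) {y x : Int} (v : Int)
    (hy0 : 0 ≤ y) (hy : y < n) (hx0 : 0 ≤ x) (hx : x < n) :
    pvSet2 (pvMk n F) y x v = pvMk n (fun a b => if a = y ∧ b = x then v else F a b) := by
  unfold pvSet2 pvMk
  rw [PySem.List.pyGetD_map_pyRange_of_nonneg _ _ _ _ hy0 hy]
  rw [PySem.List.pySetD_of_nonneg _ _ hx0, PySem.List.pySetD_of_nonneg _ _ hy0]
  rw [pvSetMapRange n _ x v hx0 hx, pvSetMapRange n _ y _ hy0 hy]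
  apply List.map_congr_left
  intro a ha
  by_cases hay : a = y
  · subst hay
    rw [if_pos rfl]
    apply List.map_congr_left
    intro b hb
    by_cases hbx : b = x <;> simp [hbx]
  · simp only [if_neg hay]
    apply List.map_congr_left
    intro b hb
    have : ¬ (a = y ∧ b = x) := fun h => hay h.1
    simp [this]

def pvF (n i : Int) : Int := max (PySem.Int.floordiv i n) (PySem.Int.mod i n) + 1

theorem pvF_eq (n y x : Int) (hn : 0 < n) (_hy0 : 0 ≤ y) (hx0 : 0 ≤ x) (hx : x < n) :
    pvF n (y * n + x) = max y x + 1 := by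
  unfold pvF
  have hdiv : PySem.Int.floordiv (y * n + x) n = y := by
    rw [PySem.Int.floordiv_eq_iff_of_pos hn]
    constructor <;> nlinarith
  have hmod : PySem.Int.mod (y * n + x) n = x := by
    have := PySem.Int.floordiv_mul_add_mod (y * n + x) n
    rw [hdiv] at this
    omega
  rw [hdiv, hmod]

theorem pvFilter_aux (l r : Int) : ∀ (k : Nat) (a b : Int), (b - a).toNat = k →
    (PySem.List.pyRange a b 1).filter (fun i => decide (l ≤ i) && decide (i ≤ r))
    = PySem.List.pyRange (max a l) (min b (r + 1)) 1 := by
  intro k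
  induction k with
  | zero =>
    intro a b hk
    rw [PySem.List.pyRange_one_eq_nil (by omega), PySem.List.pyRange_one_eq_nil (by omega)]
    rfl
  | succ k ih =>
    intro a b hk
    have hab : a < b := by omega
    rw [PySem.List.pyRange_one_cons hab, List.filter_cons,
        ih (a + 1) b (by omega)]
    by_cases h1 : l ≤ a
    · by_cases h2 : a ≤ r
      · have hc : (decide (l ≤ a) && decide (a ≤ r)) = true := by simp [h1, h2]
        rw [hc]
        rw [show max a l = a by omega, show max (a + 1) l = a + 1 by omega,
            PySem.List.pyRange_one_cons (show a < min b (r + 1) by omega)]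
        simp
      · have hc : (decide (l ≤ a) && decide (a ≤ r)) = false := by simp [h2]
        rw [hc]
        simp only [Bool.false_eq_true, if_false]
        rw [PySem.List.pyRange_one_eq_nil (show min b (r + 1) ≤ max (a + 1) l by omega),
            PySem.List.pyRange_one_eq_nil (show min b (r + 1) ≤ max a l by omega)]
    · have hc : (decide (l ≤ a) && decide (a ≤ r)) = false := by simp [h1]
      rw [hc]
      simp only [Bool.false_eq_true, if_false]
      rw [show max (a + 1) l = max a l by omega]

theorem pvFilter_range (l r : Int) (a b : Int) :
    (PySem.List.pyRange a b 1).filter (fun i => decide (l ≤ i) && decide (i ≤ r))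
    = PySem.List.pyRange (max a l) (min b (r + 1)) 1 :=
  pvFilter_aux l r (b - a).toNat a b rfl

def pvG (k y x : Int) : Int := if max y x < k then max y x + 1 else 0

def pvH (y j a b : Int) : Int :=
  if max a b < y ∨ (max a b = y ∧ min a b < j) ∨ (a = y ∧ b = y) then max a b + 1 else 0

theorem pvFill_inner_aux (n y : Int) (hy0 : 0 ≤ y) (hy : y < n) :
    ∀ (k : Nat) (j : Int), 0 ≤ j → j ≤ y → (y - j).toNat = k →
    (PySem.List.pyRange j y 1).foldl (fun m i =>
        let m := pvSet2 m y i (pvGet2 m y y)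
        pvSet2 m i y (pvGet2 m y y)) (pvMk n (pvH y j))
    = pvMk n (pvG (y + 1)) := by
  intro k
  induction k with
  | zero =>
    intro j hj0 hjy hk
    rw [PySem.List.pyRange_one_eq_nil (by omega)]
    simp only [List.foldl_nil]
    have : j = y := by omega
    subst this
    apply pvMk_congr
    intro a b ha0 han hb0 hbn
    unfold pvH pvG
    split_ifs <;> omega
  | succ k ih =>
    intro j hj0 hjy hk
    have hjy' : j < y := by omega
    rw [PySem.List.pyRange_one_cons hjy']
    simp only [List.foldl_cons]
    have hstep :
        (let m := pvSet2 (pvMk n (pvH y j)) y j (pvGet2 (pvMk n (pvH y j)) y y)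
         pvSet2 m j y (pvGet2 m y y)) = pvMk n (pvH y (j + 1)) := by
      simp only
      rw [pvGet2_mk n _ hy0 hy hy0 hy]
      rw [pvSet2_mk n _ _ hy0 hy hj0 (by omega)]
      rw [pvGet2_mk n _ hy0 hy hy0 hy]
      rw [pvSet2_mk n _ _ hj0 (by omega) hy0 hy]
      apply pvMk_congr
      intro a b ha0 han hb0 hbn
      unfold pvH
      split_ifs <;> omega
    rw [hstep]
    exact ih (j + 1) (by omega) (by omega) (by omega)

theorem pvFill_aux (n : Int) : ∀ (kk : Nat), (kk : Int) ≤ n →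
    (PySem.List.pyRange 0 (kk : Int) 1).foldl (fun m y =>
      let m := pvSet2 m y y (y + 1)
      (PySem.List.pyRange 0 y 1).foldl (fun m i =>
        let m := pvSet2 m y i (pvGet2 m y y)
        pvSet2 m i y (pvGet2 m y y)) m)
      (pvMk n (pvG 0))
    = pvMk n (pvG kk) := by
  intro kk
  induction kk with
  | zero =>
    intro _
    rw [PySem.List.pyRange_one_eq_nil (by omega)]
    rfl
  | succ k ih =>
    intro hkn
    have hk0 : (0 : Int) ≤ (k : Int) := by positivity
    have hkn' : (k : Int) < n := by push_cast at hkn ⊢; omega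
    rw [show ((k + 1 : Nat) : Int) = (k : Int) + 1 by push_cast; ring,
        PySem.List.pyRange_one_succ_right hk0, List.foldl_append, ih (by omega)]
    simp only [List.foldl_cons, List.foldl_nil]
    have h1 : pvSet2 (pvMk n (pvG (k : Int))) (k : Int) (k : Int) ((k : Int) + 1)
        = pvMk n (pvH (k : Int) 0) := by
      rw [pvSet2_mk n _ _ hk0 hkn' hk0 hkn']
      apply pvMk_congr
      intro a b ha0 han hb0 hbn
      unfold pvG pvH
      split_ifs <;> omega
    rw [h1]
    exact pvFill_inner_aux n (k : Int) hk0 hkn' (k : Int).toNat 0 le_rfl hk0 (by omega)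

theorem pvCollect_inner (n left right y : Int) (m : List (List Int)) (hn : 0 < n)
    (hy0 : 0 ≤ y) (hy : y < n)
    (hm : ∀ a b, 0 ≤ a → a < n → 0 ≤ b → b < n → pvGet2 m a b = max a b + 1) :
    ∀ (k : Nat) (j : Int) (ans : List Int), 0 ≤ j → j ≤ n → (n - j).toNat = k →
    (PySem.List.pyRange j n 1).foldl (fun (st : List Int × Int) x =>
        let (answer, idx) := st
        if left ≤ idx ∧ idx ≤ right then
          let _num := if x > y then x else y
          (answer ++ [pvGet2 m y x], idx + 1)
        else (answer, idx + 1)) (ans, y * n + j)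
    = ((PySem.List.pyRange (y * n + j) (y * n + n) 1).foldl
        (fun acc i => if (decide (left ≤ i) && decide (i ≤ right)) = true then acc ++ [pvF n i] else acc) ans,
       y * n + n) := by
  intro k
  induction k with
  | zero =>
    intro j ans hj0 hjn hk
    have hjn' : j = n := by omega
    subst hjn'
    rw [PySem.List.pyRange_one_eq_nil le_rfl, PySem.List.pyRange_one_eq_nil le_rfl]
    rfl
  | succ k ih =>
    intro j ans hj0 hjn hk
    have hjn' : j < n := by omega
    have hinit : (match ((ans, y * n + j) : List Int × Int) with
        | (answer, idx) =>
          if left ≤ idx ∧ idx ≤ right then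
            let _num := if j > y then j else y
            (answer ++ [pvGet2 m y j], idx + 1)
          else (answer, idx + 1))
        = if left ≤ y * n + j ∧ y * n + j ≤ right then (ans ++ [pvGet2 m y j], y * n + j + 1)
          else (ans, y * n + j + 1) := rfl
    rw [PySem.List.pyRange_one_cons hjn', List.foldl_cons, hinit,
        PySem.List.pyRange_one_cons (show y * n + j < y * n + n by omega), List.foldl_cons]
    have hval : pvGet2 m y j = pvF n (y * n + j) := by
      rw [hm y j hy0 hy hj0 hjn', pvF_eq n y j hn hy0 hj0 hjn']
    by_cases hc : left ≤ y * n + j ∧ y * n + j ≤ right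
    · rw [if_pos hc, if_pos (show (decide (left ≤ y * n + j) && decide (y * n + j ≤ right)) = true by
        simp [hc.1, hc.2]), hval]
      have := ih (j + 1) (ans ++ [pvF n (y * n + j)]) (by omega) (by omega) (by omega)
      rw [show y * n + (j + 1) = y * n + j + 1 by ring] at this
      exact this
    · rw [if_neg hc, if_neg (show ¬ (decide (left ≤ y * n + j) && decide (y * n + j ≤ right)) = true by
        simpa using hc)]
      have := ih (j + 1) ans (by omega) (by omega) (by omega)
      rw [show y * n + (j + 1) = y * n + j + 1 by ring] at this
      exact this

theorem pvCollect (n left right : Int) (m : List (List Int)) (hn : 0 < n)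
    (hm : ∀ a b, 0 ≤ a → a < n → 0 ≤ b → b < n → pvGet2 m a b = max a b + 1) :
    ∀ (kk : Nat), (kk : Int) ≤ n →
    (PySem.List.pyRange 0 (kk : Int) 1).foldl (fun st y =>
      (PySem.List.pyRange 0 n 1).foldl (fun (st : List Int × Int) x =>
        let (answer, idx) := st
        if left ≤ idx ∧ idx ≤ right then
          let _num := if x > y then x else y
          (answer ++ [pvGet2 m y x], idx + 1)
        else (answer, idx + 1)) st) ([], 0)
    = ((PySem.List.pyRange 0 ((kk : Int) * n) 1).foldl
        (fun acc i => if (decide (left ≤ i) && decide (i ≤ right)) = true then acc ++ [pvF n i] else acc) [],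
       (kk : Int) * n) := by
  intro kk
  induction kk with
  | zero =>
    intro _
    simp only [Nat.cast_zero, zero_mul]
    rw [PySem.List.pyRange_one_eq_nil le_rfl]
    rfl
  | succ k ih =>
    intro hkn
    have hk0 : (0 : Int) ≤ (k : Int) := by positivity
    have hkn' : (k : Int) < n := by push_cast at hkn ⊢; omega
    rw [show ((k + 1 : Nat) : Int) = (k : Int) + 1 by push_cast; ring,
        PySem.List.pyRange_one_succ_right hk0, List.foldl_append, ih (by omega),
        List.foldl_cons, List.foldl_nil]
    set A := (PySem.List.pyRange 0 ((k : Int) * n) 1).foldl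
        (fun acc i => if (decide (left ≤ i) && decide (i ≤ right)) = true then acc ++ [pvF n i] else acc)
        ([] : List Int) with hA
    show (PySem.List.pyRange 0 n 1).foldl _ (A, (k : Int) * n) = _
    have h1 : (k : Int) * n = (k : Int) * n + 0 := by ring
    rw [h1]
    rw [pvCollect_inner n left right (k : Int) m hn hk0 hkn' hm n.toNat 0
        A (by omega) (by omega) (by omega)]
    have h2 : ((k : Int) + 1) * n = (k : Int) * n + 0 + n := by ring
    rw [h2, PySem.List.pyRange_one_append 0 ((k : Int) * n + 0) ((k : Int) * n + 0 + n)
        (by linarith [mul_nonneg hk0 hn.le]) (by linarith), List.foldl_append, ← h1, ← hA]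



theorem solution_eq (n left right : Int) : solution n left right = solution_alt n left right := by
  unfold solution solution_alt
  by_cases hn : n ≤ 0
  · rw [PySem.List.pyRange_one_eq_nil hn, if_pos hn]
    rfl
  · replace hn : 0 < n := by omega
    rw [if_neg (by omega)]
    simp only
    -- initial matrix is pvMk n (pvG 0)
    have h0 : (PySem.List.pyRange 0 n 1).map (fun _j => (PySem.List.pyRange 0 n 1).map (fun _i => (0 : Int)))
        = pvMk n (pvG 0) := by
      unfold pvMk
      apply List.map_congr_left
      intro y hy
      rw [PySem.List.mem_pyRange_one] at hy
      apply List.map_congr_left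
      intro x hx
      rw [PySem.List.mem_pyRange_one] at hx
      unfold pvG
      rw [if_neg (by omega)]
    rw [h0]
    have hfill := pvFill_aux n n.toNat (by omega)
    rw [Int.toNat_of_nonneg hn.le] at hfill
    rw [hfill]
    have hm : ∀ a b, 0 ≤ a → a < n → 0 ≤ b → b < n →
        pvGet2 (pvMk n (pvG n)) a b = max a b + 1 := by
      intro a b ha0 han hb0 hbn
      rw [pvGet2_mk n _ ha0 han hb0 hbn]
      unfold pvG
      rw [if_pos (by omega)]
    have hcol := pvCollect n left right (pvMk n (pvG n)) hn hm n.toNat (by omega)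
    rw [Int.toNat_of_nonneg hn.le] at hcol
    rw [hcol]
    simp only
    rw [PySem.List.foldl_append_if (fun i => decide (left ≤ i) && decide (i ≤ right)) (pvF n)]
    rw [pvFilter_range left right 0 (n * n)]
    rw [List.nil_append]
    rw [show max 0 left = max left 0 by omega, show min (n * n) (right + 1) = min right (n * n - 1) + 1 by omega]
    rfl

-- ===== VERDICT (by name: the statement is the Claim_ definition above) =====
theorem solution_spec : Claim_equal_solution := by
  intro n left right _
  unfold Spec_solution
  exact solution_eq n left right
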